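-- pv_equiv track=rewrite | github.com/BRinvelt/mycroft-skills | build_test_config.py | get_pull_request_submodule
-- ===== SOURCE A (Python) =====
-- def get_pull_request_submodule(pull_request_diff):
--     """Determine the submodule name of the skill added/modified in the PR"""
--     diff_file_name = None
--     skill_submodule_path = None
--     for line in pull_request_diff:
--         #  The line indicating the file being compared looks like this:
--         #    diff --git a/<file name> b/<file name>
--         if line.startswith('diff --git a/'):
--             words = line.split()
--             diff_file_name = words[2].lstrip('a/').rstrip(' b/')
--         # If a file contains a subproject commit hash it represents a skill
--         if line.startswith('+Subproject commit '):
--             skill_submodule_path = diff_file_name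
--             break
--
--     return skill_submodule_path
-- ===== SOURCE B (Python) =====
-- def get_pull_request_submodule(pull_request_diff):
--     """Determine the submodule name of the skill added/modified in the PR.
--
--     Locate the first '+Subproject commit ' marker, then scan backwards for
--     the nearest preceding 'diff --git a/' header and parse its file name.
--     """
--     lines = list(pull_request_diff)
--     sub_idx = next((i for i, line in enumerate(lines)
--                     if line.startswith('+Subproject commit ')), None)
--     if sub_idx is None:
--         return None
--     for i in range(sub_idx - 1, -1, -1):
--         if lines[i].startswith('diff --git a/'):
--             words = lines[i].split()
--             return words[2].lstrip('a/').rstrip(' b/')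
--     return None
-- ===== Notes on version B (the rewrite author's own statement) =====
-- stated objective: alternative
-- what changed: Replaces the forward single-pass accumulator (remember last diff header, return it at the first subproject marker) with a locate-the-marker-then-backward-scan decomposition: find the index of the first '+Subproject commit ' line, then search backwards for the nearest preceding 'diff --git a/' header and parse it.
import Mathlib
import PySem

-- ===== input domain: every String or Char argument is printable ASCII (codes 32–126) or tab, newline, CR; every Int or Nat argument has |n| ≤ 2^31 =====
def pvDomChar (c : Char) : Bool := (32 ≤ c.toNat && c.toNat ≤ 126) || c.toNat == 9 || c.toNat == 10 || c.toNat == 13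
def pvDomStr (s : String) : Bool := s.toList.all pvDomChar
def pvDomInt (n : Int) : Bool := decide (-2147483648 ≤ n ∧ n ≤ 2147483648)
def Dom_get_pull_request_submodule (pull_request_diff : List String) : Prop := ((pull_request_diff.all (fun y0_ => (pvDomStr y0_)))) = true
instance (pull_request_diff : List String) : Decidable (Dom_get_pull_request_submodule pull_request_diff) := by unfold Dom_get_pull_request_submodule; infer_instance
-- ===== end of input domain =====

-- B replaces A's forward accumulator loop with a locate-the-marker-then-backward-scan decomposition (alternative; same cost).

-- ===== PORT A =====
-- hand port of s.lstrip(chars): drop leading characters that are members of the chars set (exact Python semantics)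
def pyLstripChars (s chars : String) : String :=
  String.ofList (s.toList.dropWhile (fun c => chars.toList.contains c))

-- hand port of s.rstrip(chars): drop trailing characters that are members of the chars set (exact Python semantics)
def pyRstripChars (s chars : String) : String :=
  String.ofList ((s.toList.reverse.dropWhile (fun c => chars.toList.contains c)).reverse)

-- words[2].lstrip('a/').rstrip(' b/') for a 'diff --git a/…' line; the none branch is unreachable
-- (a line starting with 'diff --git a/' always splits into ≥ 3 words, so Python never raises here)
def pvParseDiffLine (l : String) : String :=
  match PySem.List.pyGet? (PySem.Str.split₀ l) 2 with
  | some w => pyRstripChars (pyLstripChars w "a/") " b/"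
  | none => ""

-- the for loop of A: state dfn = diff_file_name; returns at the break, none after the loop
def pvGoA : List String → Option String → Option String
  | [], _ => none
  | l :: rest, dfn =>
    let dfn' := if PySem.Str.startswith l "diff --git a/" then some (pvParseDiffLine l) else dfn
    if PySem.Str.startswith l "+Subproject commit " then dfn' else pvGoA rest dfn'

def get_pull_request_submodule (pull_request_diff : List String) : Option String :=
  pvGoA pull_request_diff none

-- ===== PORT B =====
-- next((i for i, line in enumerate(lines) if line.startswith('+Subproject commit ')), None)
def pvFindSub : List String → Nat → Option Nat
  | [], _ => none
  | l :: rest, i =>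
    if PySem.Str.startswith l "+Subproject commit " then some i else pvFindSub rest (i + 1)

-- for i in range(sub_idx - 1, -1, -1): …  — argument j+1 means the next examined index is j;
-- the index is always in range, so the .getD "" default is never used
def pvScanBack (lines : List String) : Nat → Option String
  | 0 => none
  | j + 1 =>
    let l := (PySem.List.pyGet? lines (j : Int)).getD ""
    if PySem.Str.startswith l "diff --git a/" then some (pvParseDiffLine l)
    else pvScanBack lines j

def get_pull_request_submodule_alt (pull_request_diff : List String) : Option String :=
  match pvFindSub pull_request_diff 0 with
  | none => none
  | some i => pvScanBack pull_request_diff i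

-- ===== PRECONDITION & SPEC =====
def Spec_get_pull_request_submodule (pull_request_diff : List String) (out : Option String) : Prop := out = get_pull_request_submodule_alt pull_request_diff
instance (pull_request_diff : List String) (out : Option String) : Decidable (Spec_get_pull_request_submodule pull_request_diff out) := by unfold Spec_get_pull_request_submodule; infer_instance

-- ===== CLAIM (what is proved, stated in full; the proofs are below) =====
def Claim_equal_get_pull_request_submodule : Prop := ∀ (pull_request_diff : List String), Dom_get_pull_request_submodule pull_request_diff → Spec_get_pull_request_submodule pull_request_diff (get_pull_request_submodule pull_request_diff)

-- ===== LEMMAS AND PROOFS =====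
-- proof-only helper: first-some of two options
def pvOr (x d : Option String) : Option String :=
  match x with
  | some r => some r
  | none => d

theorem pv_disjoint (l : String)
    (h : PySem.Str.startswith l "diff --git a/" = true) :
    PySem.Str.startswith l "+Subproject commit " = false := by
  by_contra hne
  have h2 : PySem.Str.startswith l "+Subproject commit " = true := by
    cases hp : PySem.Str.startswith l "+Subproject commit " with
    | true => rfl
    | false => exact absurd hp hne
  have p1 : ("diff --git a/").toList <+: l.toList := by
    have := (PySem.Chars.startswith_iff l.toList ("diff --git a/").toList).mp (by simpa using h)
    exact this
  have p2 : ("+Subproject commit ").toList <+: l.toList := by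
    have := (PySem.Chars.startswith_iff l.toList ("+Subproject commit ").toList).mp (by simpa using h2)
    exact this
  obtain ⟨t1, ht1⟩ := p1
  obtain ⟨t2, ht2⟩ := p2
  have : l.toList.head? = some 'd' := by rw [← ht1]; rfl
  have h' : l.toList.head? = some '+' := by rw [← ht2]; rfl
  simp [this] at h'

theorem pvFindSub_succ (lines : List String) (i : Nat) :
    pvFindSub lines (i + 1) = (pvFindSub lines i).map (· + 1) := by
  induction lines generalizing i with
  | nil => rfl
  | cons l rest ih =>
    simp only [pvFindSub]
    split_ifs with h
    · rfl
    · exact ih (i + 1)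

theorem pvScanBack_cons (j : Nat) (l : String) (lines : List String) :
    pvScanBack (l :: lines) (j + 1) =
      pvOr (pvScanBack lines j)
        (if PySem.Str.startswith l "diff --git a/" then some (pvParseDiffLine l) else none) := by
  induction j with
  | zero =>
    simp only [pvScanBack, pvOr]
    have h0 : PySem.List.pyGet? (l :: lines) ((0 : Nat) : Int) = some l := by simp
    rw [h0]
    rfl
  | succ j ih =>
    have hg : PySem.List.pyGet? (l :: lines) ((j + 1 : Nat) : Int) =
        PySem.List.pyGet? lines (j : Int) := by
      simp [PySem.List.pyGet?_natCast]
    simp only [pvScanBack]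
    rw [hg]
    by_cases hd : PySem.Str.startswith ((PySem.List.pyGet? lines (j : Int)).getD "") "diff --git a/" = true
    · rw [if_pos hd, if_pos hd]
      rfl
    · rw [if_neg hd, if_neg hd]
      show pvScanBack (l :: lines) (j + 1) = _
      exact ih

theorem pvOr_assoc (x g d : Option String) :
    pvOr (pvOr x g) d = pvOr x (pvOr g d) := by
  cases x <;> rfl

theorem pv_main (lines : List String) (d : Option String) :
    pvGoA lines d =
      match pvFindSub lines 0 with
      | none => none
      | some i => pvOr (pvScanBack lines i) d := by
  induction lines generalizing d with
  | nil => rfl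
  | cons l rest ih =>
    simp only [pvGoA, pvFindSub]
    by_cases hs : PySem.Str.startswith l "+Subproject commit " = true
    · have hd : PySem.Str.startswith l "diff --git a/" = false := by
        by_contra hne
        have hdt : PySem.Str.startswith l "diff --git a/" = true := by
          cases hp : PySem.Str.startswith l "diff --git a/" with
          | true => rfl
          | false => exact absurd hp hne
        rw [pv_disjoint l hdt] at hs
        exact Bool.false_ne_true hs
      rw [if_pos hs, if_pos hs, if_neg (by rw [hd]; simp)]
      rfl
    · rw [if_neg hs, if_neg hs, ih]
      rw [show (1 : Nat) = 0 + 1 from rfl, pvFindSub_succ]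
      cases hf : pvFindSub rest 0 with
      | none => rfl
      | some i =>
        simp only [Option.map_some]
        show pvOr (pvScanBack rest i)
            (if PySem.Str.startswith l "diff --git a/" then some (pvParseDiffLine l) else d) =
          pvOr (pvScanBack (l :: rest) (i + 1)) d
        rw [pvScanBack_cons, pvOr_assoc]
        by_cases hdl : PySem.Str.startswith l "diff --git a/" = true
        · rw [if_pos hdl, if_pos hdl]
          rfl
        · rw [if_neg hdl, if_neg hdl]
          rfl

-- ===== VERDICT (by name: the statement is the Claim_ definition above) =====
theorem get_pull_request_submodule_spec : Claim_equal_get_pull_request_submodule := by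
  intro lines _
  show get_pull_request_submodule lines = get_pull_request_submodule_alt lines
  unfold get_pull_request_submodule get_pull_request_submodule_alt
  rw [pv_main]
  cases hf : pvFindSub lines 0 with
  | none => rfl
  | some i => cases hx : pvScanBack lines i <;> simp [pvOr, hx]
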